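-- pv_equiv track=rewrite | github.com/prebenness/mdl | prime_rationals.py | exponents_to_rational
-- ===== SOURCE A (Python) =====
-- def exponents_to_rational(e, primes):
--     """Convert integer exponent vector to (numerator, denominator).
--
--     Args:
--         e: 1D array/list of integer exponents.
--         primes: list of prime numbers.
--
--     Returns:
--         (num, den) as Python ints, automatically coprime.
--     """
--     num = 1
--     den = 1
--     for exp_val, p in zip(e, primes):
--         exp_int = int(round(float(exp_val)))
--         if exp_int > 0:
--             num *= p ** exp_int
--         elif exp_int < 0:
--             den *= p ** (-exp_int)
--     return num, den
-- ===== SOURCE B (Python) =====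
-- def exponents_to_rational(e, primes):
--     """Convert integer exponent vector to (numerator, denominator).
--
--     Divide-and-conquer: split the (exponent, prime) pairs in half, compute
--     each half's (num, den) recursively, and multiply component-wise.
--     Multiplication of ints is associative, so the balanced product tree
--     yields exactly the same two products as a left-to-right loop.
--     """
--     pairs = list(zip(e, primes))
--
--     def go(lo, hi):
--         if hi - lo <= 1:
--             if lo == hi:
--                 return 1, 1
--             exp_val, p = pairs[lo]
--             k = int(round(float(exp_val)))
--             if k > 0:
--                 return p ** k, 1
--             if k < 0:
--                 return 1, p ** (-k)
--             return 1, 1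
--         mid = (lo + hi) // 2
--         n1, d1 = go(lo, mid)
--         n2, d2 = go(mid, hi)
--         return n1 * n2, d1 * d2
--
--     return go(0, len(pairs))
-- ===== Notes on version B (the rewrite author's own statement) =====
-- stated objective: alternative
-- what changed: Replaces A's left-to-right loop with two running accumulators and a sign branch by a divide-and-conquer recursion that splits the (exponent, prime) pairs at the midpoint, computes each half's (num, den) and multiplies component-wise (a balanced product tree; equal by associativity of int multiplication).
import Mathlib
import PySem

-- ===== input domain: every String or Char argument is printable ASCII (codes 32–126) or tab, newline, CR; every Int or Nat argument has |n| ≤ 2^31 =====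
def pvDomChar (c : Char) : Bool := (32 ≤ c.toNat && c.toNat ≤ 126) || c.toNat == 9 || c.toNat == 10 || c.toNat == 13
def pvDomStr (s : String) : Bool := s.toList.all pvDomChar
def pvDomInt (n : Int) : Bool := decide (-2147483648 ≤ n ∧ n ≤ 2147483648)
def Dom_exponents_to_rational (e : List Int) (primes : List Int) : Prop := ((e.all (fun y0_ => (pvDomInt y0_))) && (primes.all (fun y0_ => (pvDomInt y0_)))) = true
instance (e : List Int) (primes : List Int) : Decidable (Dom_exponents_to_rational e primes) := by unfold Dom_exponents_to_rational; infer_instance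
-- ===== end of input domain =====

-- B replaces A's left-to-right accumulator loop by a divide-and-conquer product tree
-- over the (exponent, prime) pairs (objective: alternative; same values by associativity).

-- ===== PORT A =====
-- A's loop over zip(e, primes) with accumulators (num, den).
-- int(round(float(exp_val))) = exp_val for |exp_val| ≤ 2^31 (float is exact there), so it ports to the identity on Dom.
def exponents_to_rational (e : List Int) (primes : List Int) : Int × Int :=
  (e.zip primes).foldl
    (fun s xp =>
      let exp_int := xp.1
      if exp_int > 0 then (s.1 * xp.2 ^ exp_int.toNat, s.2)
      else if exp_int < 0 then (s.1, s.2 * xp.2 ^ (-exp_int).toNat)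
      else s)
    (1, 1)

-- ===== PORT B =====
-- B's recursive go(lo, hi) over the pairs array, ported as recursion on the sublist
-- (take/drop at the midpoint = Python's index halving); leaf = one pair's contribution.
-- The Nat fuel (initially the list length, strictly above every recursion depth need)
-- only makes the recursion structural; it never alters the computed value.
def pvGoB (fuel : Nat) (l : List (Int × Int)) : Int × Int :=
  match fuel with
  | 0 => (1, 1)
  | fuel + 1 =>
    if l.length ≤ 1 then
      match l with
      | [] => (1, 1)
      | xp :: _ =>
        if xp.1 > 0 then (xp.2 ^ xp.1.toNat, 1)
        else if xp.1 < 0 then (1, xp.2 ^ (-xp.1).toNat)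
        else (1, 1)
    else
      let m := l.length / 2
      let p := pvGoB fuel (l.take m)
      let q := pvGoB fuel (l.drop m)
      (p.1 * q.1, p.2 * q.2)

def exponents_to_rational_alt (e : List Int) (primes : List Int) : Int × Int :=
  pvGoB (e.zip primes).length (e.zip primes)

-- ===== PRECONDITION & SPEC =====
def Spec_exponents_to_rational (e : List Int) (primes : List Int) (out : Int × Int) : Prop := out = exponents_to_rational_alt e primes
instance (e : List Int) (primes : List Int) (out : Int × Int) : Decidable (Spec_exponents_to_rational e primes out) := by unfold Spec_exponents_to_rational; infer_instance

-- ===== CLAIM (what is proved, stated in full; the proofs are below) =====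
def Claim_equal_exponents_to_rational : Prop := ∀ (e : List Int) (primes : List Int), Dom_exponents_to_rational e primes → Spec_exponents_to_rational e primes (exponents_to_rational e primes)

-- ===== LEMMAS AND PROOFS =====

-- the two component products both ports compute
def pvNum (l : List (Int × Int)) : Int :=
  (((l.filter (fun xp => decide (xp.1 > 0))).map (fun xp => xp.2 ^ xp.1.toNat)).prod)
def pvDen (l : List (Int × Int)) : Int :=
  (((l.filter (fun xp => decide (xp.1 < 0))).map (fun xp => xp.2 ^ (-xp.1).toNat)).prod)

theorem pvNum_append (a b : List (Int × Int)) : pvNum (a ++ b) = pvNum a * pvNum b := by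
  simp [pvNum]
theorem pvDen_append (a b : List (Int × Int)) : pvDen (a ++ b) = pvDen a * pvDen b := by
  simp [pvDen]

-- A's fold starting from (a, b) multiplies a by pvNum and b by pvDen.
theorem pv_fold_eq (l : List (Int × Int)) : ∀ (a b : Int),
    l.foldl
      (fun s xp =>
        let exp_int := xp.1
        if exp_int > 0 then (s.1 * xp.2 ^ exp_int.toNat, s.2)
        else if exp_int < 0 then (s.1, s.2 * xp.2 ^ (-exp_int).toNat)
        else s)
      (a, b)
    = (a * pvNum l, b * pvDen l) := by
  induction l with
  | nil => intro a b; simp [pvNum, pvDen]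
  | cons x l ih =>
    intro a b
    by_cases h1 : x.1 > 0
    · simp [List.foldl_cons, h1, not_lt_of_gt h1, ih, pvNum, pvDen, mul_assoc]
    · by_cases h2 : x.1 < 0
      · simp [List.foldl_cons, h1, h2, ih, pvNum, pvDen, mul_assoc]
      · simp [List.foldl_cons, h1, h2, ih, pvNum, pvDen]

-- B's product tree computes the same two products (associativity of Int multiplication).
theorem pv_singleton_eq (fuel : Nat) (xp : Int × Int) :
    pvGoB (fuel + 1) [xp] = (pvNum [xp], pvDen [xp]) := by
  by_cases h1 : xp.1 > 0
  · simp [pvGoB, h1, not_lt_of_gt h1, pvNum, pvDen]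
  · by_cases h2 : xp.1 < 0
    · simp [pvGoB, h1, h2, pvNum, pvDen]
    · simp [pvGoB, h1, h2, pvNum, pvDen]

theorem pvGoB_eq (fuel : Nat) : ∀ (l : List (Int × Int)), l.length ≤ fuel →
    pvGoB fuel l = (pvNum l, pvDen l) := by
  induction fuel with
  | zero =>
    intro l hl
    have : l = [] := List.eq_nil_of_length_eq_zero (by omega)
    subst this; simp [pvGoB, pvNum, pvDen]
  | succ fuel ih =>
    intro l hl
    by_cases hlen : l.length ≤ 1
    · match l, hlen with
      | [], _ => simp [pvGoB, pvNum, pvDen]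
      | [xp], _ => exact pv_singleton_eq fuel xp
    · rw [pvGoB.eq_def]
      simp only [if_neg hlen]
      rw [ih (l.take (l.length / 2)) (by simp only [List.length_take]; omega),
          ih (l.drop (l.length / 2)) (by simp only [List.length_drop]; omega)]
      conv_rhs => rw [← List.take_append_drop (l.length / 2) l]
      rw [pvNum_append, pvDen_append]

-- ===== VERDICT (by name: the statement is the Claim_ definition above) =====
theorem exponents_to_rational_spec : Claim_equal_exponents_to_rational := by
  intro e primes _
  unfold Spec_exponents_to_rational exponents_to_rational exponents_to_rational_alt
  rw [pv_fold_eq, pvGoB_eq _ _ le_rfl]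
  simp
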